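-- pv_equiv track=rewrite | github.com/FragileTech/plangym | src/plangym/videogames/montezuma.py | get_room_xy
-- ===== SOURCE A (Python) =====
-- PYRAMID = [
--     [-1, -1, -1, 0, 1, 2, -1, -1, -1],
--     [-1, -1, 3, 4, 5, 6, 7, -1, -1],
--     [-1, 8, 9, 10, 11, 12, 13, 14, -1],
--     [15, 16, 17, 18, 19, 20, 21, 22, 23],
-- ]
--
-- KNOWN_XY: list[None | tuple[int, int]] = [None] * 24
--
-- def get_room_xy(room: int) -> None | tuple[int, int]:
--     """Get the tuple that encodes the provided room."""
--     if room >= len(KNOWN_XY) or room < 0: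
--         return None
--     if KNOWN_XY[room] is None:
--         for y, loc in enumerate(PYRAMID):
--             if room in loc:
--                 KNOWN_XY[int(room)] = (loc.index(room), y)
--                 break
--     return KNOWN_XY[room]
-- ===== SOURCE B (Python) =====
-- PYRAMID = [
--     [-1, -1, -1, 0, 1, 2, -1, -1, -1],
--     [-1, -1, 3, 4, 5, 6, 7, -1, -1],
--     [-1, 8, 9, 10, 11, 12, 13, 14, -1],
--     [15, 16, 17, 18, 19, 20, 21, 22, 23],
-- ]
--
-- # Eagerly built lookup table: KNOWN_XY[room] = (x, y) for every room in PYRAMID.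
-- KNOWN_XY: list = [None] * 24
-- for _y, _row in enumerate(PYRAMID):
--     for _x, _v in enumerate(_row):
--         if _v >= 0:
--             KNOWN_XY[_v] = (_x, _y)
--
--
-- def get_room_xy(room: int):
--     """Get the tuple that encodes the provided room."""
--     if room >= len(KNOWN_XY) or room < 0:
--         return None
--     return KNOWN_XY[room]
-- ===== Notes on version B (the rewrite author's own statement) =====
-- stated objective: simpler
-- what changed: Replaces the per-call lazy scan of PYRAMID (membership test plus list.index with memoization) by a full lookup table built once at module load, so get_room_xy is a bounds check and a single list index.
import Mathlib
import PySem

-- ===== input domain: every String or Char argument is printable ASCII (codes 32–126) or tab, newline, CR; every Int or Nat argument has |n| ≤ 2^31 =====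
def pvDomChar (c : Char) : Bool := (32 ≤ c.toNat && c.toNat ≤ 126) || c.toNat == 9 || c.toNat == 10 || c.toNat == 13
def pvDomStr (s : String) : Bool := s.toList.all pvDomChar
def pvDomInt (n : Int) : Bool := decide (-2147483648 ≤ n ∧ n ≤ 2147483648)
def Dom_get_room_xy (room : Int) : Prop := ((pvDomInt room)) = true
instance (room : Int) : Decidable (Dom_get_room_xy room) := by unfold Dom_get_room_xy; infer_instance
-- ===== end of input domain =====

-- B eagerly builds the full room→(x,y) table once; A lazily scans PYRAMID per room
-- with memoization. Return-value equivalence only: A mutates the module-level cache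
-- KNOWN_XY (the port models a call with the cache entry still None, which gives the
-- same return value on every call).

-- ===== PORT A =====
def PYRAMID : List (List Int) :=
  [[-1, -1, -1, 0, 1, 2, -1, -1, -1],
   [-1, -1, 3, 4, 5, 6, 7, -1, -1],
   [-1, 8, 9, 10, 11, 12, 13, 14, -1],
   [15, 16, 17, 18, 19, 20, 21, 22, 23]]

-- A's for-loop over enumerate(PYRAMID): first row containing room gives
-- (loc.index(room), y); KNOWN_XY[room] stays None if no row matches.
def aScan (room : Int) : List (Int × List Int) → Option (Int × Int)
  | [] => none
  | (y, loc) :: rest =>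
    if room ∈ loc then (PySem.List.index? loc room).map (fun i => ((i : Int), y))
    else aScan room rest

def get_room_xy (room : Int) : Option (Int × Int) :=
  if room ≥ 24 ∨ room < 0 then none
  else aScan room (PySem.List.enumerate PYRAMID)

-- ===== PORT B =====
-- KNOWN_XY built eagerly at module load by the double loop in Source B.
def KNOWN_XY : List (Option (Int × Int)) :=
  (PySem.List.enumerate PYRAMID).foldl
    (fun tbl (y, row) =>
      (PySem.List.enumerate row).foldl
        (fun tbl (x, v) => if v ≥ 0 then tbl.set v.toNat (some (x, y)) else tbl)
        tbl)
    (List.replicate 24 none)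

def get_room_xy_alt (room : Int) : Option (Int × Int) :=
  if room ≥ 24 ∨ room < 0 then none
  else (KNOWN_XY.getD room.toNat none)

-- ===== PRECONDITION & SPEC =====
def Spec_get_room_xy (room : Int) (out : Option (Int × Int)) : Prop := out = get_room_xy_alt room
instance (room : Int) (out : Option (Int × Int)) : Decidable (Spec_get_room_xy room out) := by unfold Spec_get_room_xy; infer_instance

-- ===== CLAIM (what is proved, stated in full; the proofs are below) =====
def Claim_equal_get_room_xy : Prop := ∀ (room : Int), Dom_get_room_xy room → Spec_get_room_xy room (get_room_xy room)

-- ===== LEMMAS AND PROOFS =====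
theorem all24 : ∀ n ∈ List.range 24, get_room_xy (n : Int) = get_room_xy_alt (n : Int) := by
  decide

theorem agree_in_range (room : Int) (h0 : 0 ≤ room) (h1 : room < 24) :
    get_room_xy room = get_room_xy_alt room := by
  have h := all24 room.toNat (by rw [List.mem_range]; omega)
  rwa [Int.toNat_of_nonneg h0] at h

-- ===== VERDICT (by name: the statement is the Claim_ definition above) =====
theorem get_room_xy_spec : Claim_equal_get_room_xy := by
  intro room _
  unfold Spec_get_room_xy
  by_cases h : room ≥ 24 ∨ room < 0
  · simp [get_room_xy, get_room_xy_alt, h]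
  · exact agree_in_range room (by omega) (by omega)
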